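-- pv_equiv track=rewrite | github.com/ai-mohitkumar/HMS | models.py | check_medication_interactions
-- ===== SOURCE A (Python) =====
-- def check_medication_interactions(medications):
--     # Simple interaction checking - in real app, this would use a comprehensive database
--     interactions = []
--     for i, med1 in enumerate(medications):
--         for med2 in medications[i+1:]:
--             # Check for known interactions (simplified example)
--             if ('aspirin' in med1.lower() and 'warfarin' in med2.lower()) or \
--                ('warfarin' in med1.lower() and 'aspirin' in med2.lower()):
--                 interactions.append({
--                     'medication1': med1,
--                     'medication2': med2,
--                     'severity': 'high',
--                     'description': 'Increased risk of bleeding'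
--                 })
--     return interactions
-- ===== SOURCE B (Python) =====
-- def check_medication_interactions(medications):
--     # One backward pass: maintain suffix lists of aspirin/warfarin meds, so each
--     # med pairs directly with its matching later meds (O(n + output) pair tests).
--     asp_after = []   # meds seen so far (i.e. later in the list) containing 'aspirin', reverse order
--     war_after = []   # same for 'warfarin'
--     any_after = []   # same for either
--     blocks = []
--     for med1 in reversed(medications):
--         low = med1.lower()
--         has_a = 'aspirin' in low
--         has_w = 'warfarin' in low
--         if has_a and has_w:
--             partners = any_after
--         elif has_a:
--             partners = war_after
--         elif has_w:
--             partners = asp_after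
--         else:
--             partners = []
--         blocks.append([
--             {'medication1': med1, 'medication2': med2,
--              'severity': 'high', 'description': 'Increased risk of bleeding'}
--             for med2 in reversed(partners)])
--         if has_a:
--             asp_after.append(med1)
--         if has_w:
--             war_after.append(med1)
--         if has_a or has_w:
--             any_after.append(med1)
--     return [d for blk in reversed(blocks) for d in blk]
-- ===== Notes on version B (the rewrite author's own statement) =====
-- stated objective: faster
-- what changed: Replaces the all-pairs double loop (which lowercases and substring-tests every pair) with one backward pass that precomputes each medication's aspirin/warfarin flags once and keeps suffix lists of matching medications, emitting exactly the matching pairs in the same order.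
import Mathlib
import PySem

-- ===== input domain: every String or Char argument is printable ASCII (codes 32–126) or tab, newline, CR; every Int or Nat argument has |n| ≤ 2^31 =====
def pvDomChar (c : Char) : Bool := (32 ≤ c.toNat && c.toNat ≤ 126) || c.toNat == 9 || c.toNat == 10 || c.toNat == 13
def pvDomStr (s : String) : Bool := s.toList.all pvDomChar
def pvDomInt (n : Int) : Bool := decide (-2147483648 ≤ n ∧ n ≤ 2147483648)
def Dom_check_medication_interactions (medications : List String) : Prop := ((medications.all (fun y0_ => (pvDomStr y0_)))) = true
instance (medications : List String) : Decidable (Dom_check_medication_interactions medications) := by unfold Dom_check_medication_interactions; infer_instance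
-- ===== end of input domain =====

-- B replaces A's all-pairs double loop by one backward pass that precomputes each
-- medication's aspirin/warfarin flags once and keeps suffix lists of matching
-- medications (objective: faster; same return value).

-- the interaction dict both Pythons append, as an insertion-order association list
def mkInteraction (med1 med2 : String) : List (String × String) :=
  [("medication1", med1), ("medication2", med2),
   ("severity", "high"), ("description", "Increased risk of bleeding")]

-- ===== PORT A =====
def check_medication_interactions (medications : List String) : List (List (String × String)) :=
  (PySem.List.enumerate medications 0).foldl (fun interactions p =>
    let i := p.1
    let med1 := p.2
    (PySem.List.slice medications (some (i + 1)) none).foldl (fun interactions med2 =>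
      if (PySem.Str.isIn "aspirin" (PySem.Str.lower med1) &&
          PySem.Str.isIn "warfarin" (PySem.Str.lower med2)) ||
         (PySem.Str.isIn "warfarin" (PySem.Str.lower med1) &&
          PySem.Str.isIn "aspirin" (PySem.Str.lower med2))
      then interactions ++ [mkInteraction med1 med2]
      else interactions) interactions) []

-- ===== PORT B =====
-- one step of Source B's backward loop: state = (asp_after, war_after, any_after, blocks)
def altStep
    (s : List String × List String × List String × List (List (List (String × String))))
    (med1 : String) :
    List String × List String × List String × List (List (List (String × String))) :=
  let aspAfter := s.1
  let warAfter := s.2.1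
  let anyAfter := s.2.2.1
  let blocks := s.2.2.2
  let low := PySem.Str.lower med1
  let hasA := PySem.Str.isIn "aspirin" low
  let hasW := PySem.Str.isIn "warfarin" low
  let partners :=
    if hasA && hasW then anyAfter
    else if hasA then warAfter
    else if hasW then aspAfter
    else []
  let block := partners.reverse.map (fun med2 => mkInteraction med1 med2)
  (if hasA then aspAfter ++ [med1] else aspAfter,
   if hasW then warAfter ++ [med1] else warAfter,
   if hasA || hasW then anyAfter ++ [med1] else anyAfter,
   blocks ++ [block])

def check_medication_interactions_alt (medications : List String) : List (List (String × String)) :=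
  let s := medications.reverse.foldl altStep ([], [], [], [])
  s.2.2.2.reverse.flatMap (fun blk => blk)

-- ===== PRECONDITION & SPEC =====
def Spec_check_medication_interactions (medications : List String) (out : List (List (String × String))) : Prop := out = check_medication_interactions_alt medications
instance (medications : List String) (out : List (List (String × String))) : Decidable (Spec_check_medication_interactions medications out) := by unfold Spec_check_medication_interactions; infer_instance

-- ===== CLAIM (what is proved, stated in full; the proofs are below) =====
def Claim_equal_check_medication_interactions : Prop := ∀ (medications : List String), Dom_check_medication_interactions medications → Spec_check_medication_interactions medications (check_medication_interactions medications)

-- ===== LEMMAS AND PROOFS =====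

def hasAsp (s : String) : Bool := PySem.Str.isIn "aspirin" (PySem.Str.lower s)
def hasWar (s : String) : Bool := PySem.Str.isIn "warfarin" (PySem.Str.lower s)

-- A's pair predicate
def interactsB (m x : String) : Bool := (hasAsp m && hasWar x) || (hasWar m && hasAsp x)

-- the per-medication blocks, front to back
def pairsBlocks : List String → List (List (List (String × String)))
  | [] => []
  | m :: r => ((r.filter (fun x => interactsB m x)).map (mkInteraction m)) :: pairsBlocks r

lemma inner_eq (med1 : String) (l : List String)
    (acc : List (List (String × String))) :
    l.foldl (fun interactions med2 =>
      if (PySem.Str.isIn "aspirin" (PySem.Str.lower med1) &&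
          PySem.Str.isIn "warfarin" (PySem.Str.lower med2)) ||
         (PySem.Str.isIn "warfarin" (PySem.Str.lower med1) &&
          PySem.Str.isIn "aspirin" (PySem.Str.lower med2))
      then interactions ++ [mkInteraction med1 med2]
      else interactions) acc
    = acc ++ (l.filter (fun x => interactsB med1 x)).map (mkInteraction med1) := by
  have h := PySem.List.foldl_append_if
      (p := fun med2 => interactsB med1 med2) (f := fun med2 => mkInteraction med1 med2)
      (l := l) (acc := acc)
  simpa [interactsB, hasAsp, hasWar] using h

lemma A_flat (meds : List String) :
    check_medication_interactions meds
    = (PySem.List.enumerate meds 0).flatMap (fun p =>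
        ((PySem.List.slice meds (some (p.1 + 1)) none).filter
            (fun x => interactsB p.2 x)).map (mkInteraction p.2)) := by
  unfold check_medication_interactions
  have hfun : (fun (interactions : List (List (String × String))) (p : Int × String) =>
      let i := p.1
      let med1 := p.2
      (PySem.List.slice meds (some (i + 1)) none).foldl (fun interactions med2 =>
        if (PySem.Str.isIn "aspirin" (PySem.Str.lower med1) &&
            PySem.Str.isIn "warfarin" (PySem.Str.lower med2)) ||
           (PySem.Str.isIn "warfarin" (PySem.Str.lower med1) &&
            PySem.Str.isIn "aspirin" (PySem.Str.lower med2))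
        then interactions ++ [mkInteraction med1 med2]
        else interactions) interactions)
      = (fun interactions p =>
          interactions ++ ((PySem.List.slice meds (some (p.1 + 1)) none).filter
            (fun x => interactsB p.2 x)).map (mkInteraction p.2)) := by
    funext interactions p
    exact inner_eq p.2 _ interactions
  rw [hfun, PySem.List.foldl_append_eq_flatMap]
  simp

lemma flat_gen (pre rest : List String) :
    (PySem.List.enumerate rest (pre.length : Int)).flatMap (fun p =>
        ((PySem.List.slice (pre ++ rest) (some (p.1 + 1)) none).filter
            (fun x => interactsB p.2 x)).map (mkInteraction p.2))
    = (pairsBlocks rest).flatMap (fun blk => blk) := by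
  induction rest generalizing pre with
  | nil => simp [PySem.List.enumerate_nil, pairsBlocks]
  | cons m r ih =>
    rw [PySem.List.enumerate_cons, List.flatMap_cons]
    have hslice : PySem.List.slice (pre ++ m :: r) (some ((pre.length : Int) + 1)) none = r := by
      have h1 : ((pre.length : Int) + 1) = ((pre.length + 1 : Nat) : Int) := by push_cast; ring
      rw [h1, PySem.List.slice_from_natCast]
      simp
    have harr : pre ++ m :: r = (pre ++ [m]) ++ r := by simp
    have hlen : (pre.length : Int) + 1 = (((pre ++ [m]).length : Nat) : Int) := by
      simp
    rw [hslice]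
    rw [harr, hlen, ih (pre := pre ++ [m])]
    simp [pairsBlocks]

lemma B_state (meds : List String) :
    meds.reverse.foldl altStep ([], [], [], [])
    = ((meds.filter (fun x => hasAsp x)).reverse,
       (meds.filter (fun x => hasWar x)).reverse,
       (meds.filter (fun x => hasAsp x || hasWar x)).reverse,
       (pairsBlocks meds).reverse) := by
  rw [List.foldl_reverse]
  induction meds with
  | nil => simp [pairsBlocks]
  | cons m r ih =>
    rw [List.foldr_cons, ih]
    by_cases ha : hasAsp m <;> by_cases hw : hasWar m
    · have ha' : PySem.Chars.isIn ['a','s','p','i','r','i','n'] (PySem.Chars.lower m.toList) = true := by simpa [hasAsp] using ha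
      have hw' : PySem.Chars.isIn ['w','a','r','f','a','r','i','n'] (PySem.Chars.lower m.toList) = true := by simpa [hasWar] using hw
      have hb : r.filter (fun x => interactsB m x) = r.filter (fun x => hasAsp x || hasWar x) :=
        List.filter_congr (fun x _ => by simp [interactsB, ha, hw, Bool.or_comm])
      simp [altStep, ha', hw', hb, pairsBlocks, ha, hw]
    · have ha' : PySem.Chars.isIn ['a','s','p','i','r','i','n'] (PySem.Chars.lower m.toList) = true := by simpa [hasAsp] using ha
      have hw' : PySem.Chars.isIn ['w','a','r','f','a','r','i','n'] (PySem.Chars.lower m.toList) = false := by simpa [hasWar] using hw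
      have hb : r.filter (fun x => interactsB m x) = r.filter (fun x => hasWar x) :=
        List.filter_congr (fun x _ => by
          simp [interactsB, ha, show hasWar m = false by simpa [hasWar] using hw])
      simp [altStep, ha', hw', hb, pairsBlocks, ha, hw]
    · have ha' : PySem.Chars.isIn ['a','s','p','i','r','i','n'] (PySem.Chars.lower m.toList) = false := by simpa [hasAsp] using ha
      have hw' : PySem.Chars.isIn ['w','a','r','f','a','r','i','n'] (PySem.Chars.lower m.toList) = true := by simpa [hasWar] using hw
      have hb : r.filter (fun x => interactsB m x) = r.filter (fun x => hasAsp x) :=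
        List.filter_congr (fun x _ => by
          simp [interactsB, hw, show hasAsp m = false by simpa [hasAsp] using ha])
      simp [altStep, ha', hw', hb, pairsBlocks, ha, hw]
    · have ha' : PySem.Chars.isIn ['a','s','p','i','r','i','n'] (PySem.Chars.lower m.toList) = false := by simpa [hasAsp] using ha
      have hw' : PySem.Chars.isIn ['w','a','r','f','a','r','i','n'] (PySem.Chars.lower m.toList) = false := by simpa [hasWar] using hw
      have hb : r.filter (fun x => interactsB m x) = [] := by
        simp only [List.filter_eq_nil_iff]
        intro x _
        simp [interactsB, show hasAsp m = false by simpa [hasAsp] using ha,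
          show hasWar m = false by simpa [hasWar] using hw]
      simp [altStep, ha', hw', hb, pairsBlocks, ha, hw]

-- ===== VERDICT (by name: the statement is the Claim_ definition above) =====
theorem check_medication_interactions_spec : Claim_equal_check_medication_interactions := by
  intro meds _
  unfold Spec_check_medication_interactions
  rw [A_flat]
  unfold check_medication_interactions_alt
  rw [B_state]
  simpa using flat_gen [] meds
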